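-- pv_equiv track=rewrite | github.com/britto-jeyanth/knowledge-based-artificial-intelligence | Project2/StudentAgent.py | hasWord
-- ===== SOURCE A (Python) =====
-- def hasWord(word_list,search_for):
--     for x in range(len(word_list)):
--         for y in range(len(search_for)):
--             if(search_for=='1'):
--                 if(search_for==word_list[x]):
--                     return True
--             elif(len(word_list[x])>=len(search_for[y]) and search_for != '1'):
--                 if(word_list[x][:len(search_for[y])].lower()==search_for[y].lower()):
--                     return True
--     return False
-- ===== SOURCE B (Python) =====
-- def hasWord(word_list, search_for):
--     by_len = {}
--     for t in search_for:
--         by_len.setdefault(len(t), set()).add(t.lower())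
--     for w in word_list:
--         lw = w.lower()
--         for L, terms in by_len.items():
--             if len(lw) >= L and lw[:L] in terms:
--                 return True
--     return False
-- ===== Notes on version B (the rewrite author's own statement) =====
-- stated objective: alternative
-- what changed: Replaces A's word-by-term nested scan (re-slicing and re-lowercasing per pair) with a length-keyed dict of sets of lowercased terms built once, then one pass over the words probing the index per distinct term length.
import Mathlib
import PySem

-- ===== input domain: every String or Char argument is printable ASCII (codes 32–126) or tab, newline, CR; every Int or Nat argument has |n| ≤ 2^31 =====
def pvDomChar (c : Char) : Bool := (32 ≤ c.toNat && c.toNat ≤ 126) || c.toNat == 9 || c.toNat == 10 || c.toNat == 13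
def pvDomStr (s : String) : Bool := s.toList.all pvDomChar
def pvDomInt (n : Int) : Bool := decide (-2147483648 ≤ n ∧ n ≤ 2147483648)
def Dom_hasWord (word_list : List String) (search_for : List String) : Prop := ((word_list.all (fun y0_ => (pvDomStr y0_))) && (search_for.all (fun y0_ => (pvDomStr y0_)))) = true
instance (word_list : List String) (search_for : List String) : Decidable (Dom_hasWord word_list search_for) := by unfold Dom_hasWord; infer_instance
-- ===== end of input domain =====

-- B replaces A's word-by-term nested scan with a length-keyed index of lowercased terms built once,
-- then probes that index per word (objective: alternative data structure, same overall cost).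


-- ===== PORT A =====
-- Python's first branch tests `search_for == '1'`: a list compared with a string, which is always
-- False in Python, so only the elif branch (whose `search_for != '1'` conjunct is always True) is live.
def hasWord (word_list : List String) (search_for : List String) : Bool :=
  (PySem.List.pyRange 0 (PySem.List.len word_list)).any (fun x =>
    (PySem.List.pyRange 0 (PySem.List.len search_for)).any (fun y =>
      let wx := PySem.List.pyGetD word_list x ""
      let sy := PySem.List.pyGetD search_for y ""
      if PySem.Str.len wx ≥ PySem.Str.len sy then
        PySem.Str.lower (PySem.Str.slice wx none (some (PySem.Str.len sy))) == PySem.Str.lower sy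
      else false))

-- ===== PORT B =====
def hasWord_alt (word_list : List String) (search_for : List String) : Bool :=
  let byLen : PySem.Dict Int (PySem.Set String) :=
    search_for.foldl (fun d t =>
      d.insert (PySem.Str.len t)
        (PySem.Set.add (d.getD (PySem.Str.len t) PySem.Set.empty) (PySem.Str.lower t)))
      PySem.Dict.empty
  word_list.any (fun w =>
    let lw := PySem.Str.lower w
    byLen.items.any (fun p =>
      decide (PySem.Str.len lw ≥ p.1) &&
        PySem.Set.contains p.2 (PySem.Str.slice lw none (some p.1))))

-- ===== PRECONDITION & SPEC =====
def Spec_hasWord (word_list : List String) (search_for : List String) (out : Bool) : Prop := out = hasWord_alt word_list search_for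
instance (word_list : List String) (search_for : List String) (out : Bool) : Decidable (Spec_hasWord word_list search_for out) := by unfold Spec_hasWord; infer_instance

-- ===== CLAIM (what is proved, stated in full; the proofs are below) =====
def Claim_equal_hasWord : Prop := ∀ (word_list : List String) (search_for : List String), Dom_hasWord word_list search_for → Spec_hasWord word_list search_for (hasWord word_list search_for)

-- ===== LEMMAS AND PROOFS =====

-- the common match predicate, on toList level
def pvHit (w t : String) : Prop :=
  t.toList.length ≤ w.toList.length ∧
    PySem.Chars.lower (w.toList.take t.toList.length) = PySem.Chars.lower t.toList
-- index-building step of B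
def pvStep (d : PySem.Dict Int (PySem.Set String)) (t : String) : PySem.Dict Int (PySem.Set String) :=
  d.insert (PySem.Str.len t)
    (PySem.Set.add (d.getD (PySem.Str.len t) PySem.Set.empty) (PySem.Str.lower t))

lemma pvGetD_build (sf : List String) (d : PySem.Dict Int (PySem.Set String)) (L : Int) (p : String) :
    p ∈ (sf.foldl pvStep d).getD L PySem.Set.empty ↔
      p ∈ d.getD L PySem.Set.empty ∨ ∃ t ∈ sf, PySem.Str.len t = L ∧ PySem.Str.lower t = p := by
  induction sf generalizing d with
  | nil => simp
  | cons t rest ih =>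
    rw [List.foldl_cons, ih]
    have hstep : (pvStep d t).getD L PySem.Set.empty =
        if L = PySem.Str.len t then
          PySem.Set.add (d.getD (PySem.Str.len t) PySem.Set.empty) (PySem.Str.lower t)
        else d.getD L PySem.Set.empty :=
      PySem.Dict.getD_insert d (PySem.Str.len t) L _ PySem.Set.empty
    rw [hstep]
    split_ifs with h
    · subst h
      rw [PySem.Set.mem_add]
      simp only [List.mem_cons]
      constructor
      · rintro ((h1 | h2) | ⟨u, hu, h4, h5⟩)
        · exact Or.inl h1
        · exact Or.inr ⟨t, Or.inl rfl, rfl, h2.symm⟩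
        · exact Or.inr ⟨u, Or.inr hu, h4, h5⟩
      · rintro (h1 | ⟨u, (rfl | hu), h4, h5⟩)
        · exact Or.inl (Or.inl h1)
        · exact Or.inl (Or.inr h5.symm)
        · exact Or.inr ⟨u, hu, h4, h5⟩
    · simp only [List.mem_cons]
      constructor
      · rintro (h1 | ⟨u, hu, h4, h5⟩)
        · exact Or.inl h1
        · exact Or.inr ⟨u, Or.inr hu, h4, h5⟩
      · rintro (h1 | ⟨u, (rfl | hu), h4, h5⟩)
        · exact Or.inl h1
        · exact absurd h4.symm h
        · exact Or.inr ⟨u, hu, h4, h5⟩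

lemma pvStep_eq :
    (fun (d : PySem.Dict Int (PySem.Set String)) (t : String) =>
      d.insert (PySem.Str.len t)
        (PySem.Set.add (d.getD (PySem.Str.len t) PySem.Set.empty) (PySem.Str.lower t))) = pvStep := rfl

lemma pvKeys_build (sf : List String) :
    (sf.foldl pvStep PySem.Dict.empty).keys = PySem.Set.ofList (sf.map PySem.Str.len) := by
  rw [← pvStep_eq]
  rw [PySem.Dict.keys_foldl_insert_key sf PySem.Str.len
    (fun d t => PySem.Set.add (d.getD (PySem.Str.len t) PySem.Set.empty) (PySem.Str.lower t))
    PySem.Dict.empty]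
  rfl

lemma pvKeys_build_nodup (sf : List String) :
    (sf.foldl pvStep PySem.Dict.empty).keys.Nodup := by
  rw [← pvStep_eq]
  exact PySem.Dict.nodup_keys_foldl_insert_key sf PySem.Str.len _ PySem.Dict.empty
    (by rw [PySem.Dict.keys_empty]; exact List.nodup_nil)

-- Str.len is nonnegative and equals toList length
lemma pvLen_nonneg (s : String) : 0 ≤ PySem.Str.len s := by
  rw [PySem.Str.len_eq]; exact Int.natCast_nonneg _

-- lowercasing commutes with take and preserves length (lower is a char map)
lemma pvLower_take (cs : List Char) (n : Nat) :
    (PySem.Chars.lower cs).take n = PySem.Chars.lower (cs.take n) :=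
  (List.map_take ..).symm

lemma pvLower_length (cs : List Char) : (PySem.Chars.lower cs).length = cs.length :=
  List.length_map ..

-- A's per-pair test, reduced to pvHit
lemma pvA_pair (w t : String) :
    (if PySem.Str.len w ≥ PySem.Str.len t then
        PySem.Str.lower (PySem.Str.slice w none (some (PySem.Str.len t))) == PySem.Str.lower t
      else false) = true ↔ pvHit w t := by
  have hlen : (PySem.Str.len t).toNat = t.toList.length := by
    rw [PySem.Str.len_eq]; exact Int.toNat_natCast _
  constructor
  · intro h
    split_ifs at h with hge
    · refine ⟨by rw [PySem.Str.len_eq, PySem.Str.len_eq] at hge; exact_mod_cast hge, ?_⟩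
      have := congrArg String.toList (eq_of_beq h)
      rw [PySem.Str.toList_lower, PySem.Str.toList_lower, PySem.Str.toList_slice,
        PySem.Chars.slice_eq_listSlice, PySem.List.slice_to _ (pvLen_nonneg t), hlen] at this
      exact this
  · rintro ⟨h1, h2⟩
    have hge : PySem.Str.len w ≥ PySem.Str.len t := by
      rw [PySem.Str.len_eq, PySem.Str.len_eq]; exact_mod_cast h1
    rw [if_pos hge]
    apply beq_iff_eq.mpr
    apply String.ext
    rw [PySem.Str.toList_lower, PySem.Str.toList_lower, PySem.Str.toList_slice,
      PySem.Chars.slice_eq_listSlice, PySem.List.slice_to _ (pvLen_nonneg t), hlen]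
    exact h2

-- B's per-(word,length) probe, reduced to pvHit using the index characterization
lemma pvB_word (sf : List String) (w : String) :
    ((sf.foldl pvStep PySem.Dict.empty).items.any (fun p =>
        decide (PySem.Str.len (PySem.Str.lower w) ≥ p.1) &&
          PySem.Set.contains p.2
            (PySem.Str.slice (PySem.Str.lower w) none (some p.1)))) = true ↔
      ∃ t ∈ sf, pvHit w t := by
  set d := sf.foldl pvStep PySem.Dict.empty with hd
  have hnd := pvKeys_build_nodup sf
  rw [PySem.Dict.items_eq_map_keys d hnd PySem.Set.empty, List.any_map]
  rw [List.any_eq_true]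
  have hmem : ∀ (s : PySem.Set String) (x : String), PySem.Set.contains s x = true ↔ x ∈ s := by
    intro s x; exact List.contains_iff_mem
  constructor
  · rintro ⟨L, _hL, hp⟩
    simp only [Function.comp, Bool.and_eq_true, decide_eq_true_eq] at hp
    obtain ⟨hge, hc⟩ := hp
    rw [hmem] at hc
    rw [hd, pvGetD_build] at hc
    rcases hc with hc | ⟨t, ht, hlen, hlow⟩
    · rw [PySem.Dict.getD_empty] at hc; exact absurd hc List.not_mem_nil
    · refine ⟨t, ht, ?_, ?_⟩
      · rw [← hlen] at hge
        rw [PySem.Str.len_eq, PySem.Str.len_eq] at hge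
        have : t.toList.length ≤ (PySem.Str.lower w).toList.length := by exact_mod_cast hge
        rwa [PySem.Str.toList_lower, pvLower_length] at this
      · have := congrArg String.toList hlow
        rw [PySem.Str.toList_lower, PySem.Str.toList_slice, PySem.Chars.slice_eq_listSlice,
          PySem.List.slice_to _ (by rw [← hlen]; exact pvLen_nonneg t)] at this
        have hLn : L.toNat = t.toList.length := by
          rw [← hlen, PySem.Str.len_eq]; exact Int.toNat_natCast _
        rw [hLn, PySem.Str.toList_lower, pvLower_take] at this
        exact this.symm
  · rintro ⟨t, ht, h1, h2⟩
    refine ⟨PySem.Str.len t, ?_, ?_⟩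
    · rw [hd, pvKeys_build]
      rw [PySem.Set.mem_ofList]
      exact List.mem_map_of_mem ht
    · simp only [Function.comp, Bool.and_eq_true, decide_eq_true_eq]
      constructor
      · rw [PySem.Str.len_eq, PySem.Str.len_eq, PySem.Str.toList_lower, pvLower_length]
        exact_mod_cast h1
      · rw [hmem, hd, pvGetD_build]
        refine Or.inr ⟨t, ht, rfl, ?_⟩
        apply String.ext
        rw [PySem.Str.toList_lower, PySem.Str.toList_slice, PySem.Chars.slice_eq_listSlice,
          PySem.List.slice_to _ (pvLen_nonneg t)]
        have hLn : (PySem.Str.len t).toNat = t.toList.length := by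
          rw [PySem.Str.len_eq]; exact Int.toNat_natCast _
        rw [hLn, PySem.Str.toList_lower, pvLower_take]
        exact h2.symm

-- A's nested pyRange loops as list-level any
lemma pvA_any (word_list search_for : List String) :
    hasWord word_list search_for =
      word_list.any (fun wx => search_for.any (fun sy =>
        if PySem.Str.len wx ≥ PySem.Str.len sy then
          PySem.Str.lower (PySem.Str.slice wx none (some (PySem.Str.len sy))) == PySem.Str.lower sy
        else false)) := by
  unfold hasWord
  conv_rhs => rw [← PySem.List.map_pyGetD_pyRange_zero word_list "", List.any_map]
  apply List.any_congr rfl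
  intro x
  show _ = List.any search_for _
  conv_rhs => rw [← PySem.List.map_pyGetD_pyRange_zero search_for "", List.any_map]
  rfl

-- ===== VERDICT (by name: the statement is the Claim_ definition above) =====
theorem hasWord_spec : Claim_equal_hasWord := by
  intro word_list search_for _
  unfold Spec_hasWord
  rw [pvA_any]
  unfold hasWord_alt
  simp only [pvStep_eq]
  apply Bool.eq_iff_iff.mpr
  rw [List.any_eq_true, List.any_eq_true]
  constructor
  · rintro ⟨w, hw, hinner⟩
    refine ⟨w, hw, (pvB_word search_for w).mpr ?_⟩
    rw [List.any_eq_true] at hinner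
    obtain ⟨t, ht, hp⟩ := hinner
    exact ⟨t, ht, (pvA_pair w t).mp hp⟩
  · rintro ⟨w, hw, hinner⟩
    obtain ⟨t, ht, hhit⟩ := (pvB_word search_for w).mp hinner
    exact ⟨w, hw, List.any_eq_true.mpr ⟨t, ht, (pvA_pair w t).mpr hhit⟩⟩
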